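-- pv_equiv track=rewrite | github.com/TamirYaari91/Face-Cloaking-Project | server/connect_to_uni.py | get_path_to_final_perturbation
-- ===== SOURCE A (Python) =====
-- def get_path_to_final_perturbation(lines):
--     last_pert_ind = -1
--     pic_ind = 0
--     for i in range(len(lines) - 1, -1, -1):
--         line_start = lines[i][0:8]
--         if line_start == "SUCCESS!":
--             last_pert_ind = i
--             pic_ind += 1
--             if pic_ind == 2:
--                 break
--     return lines[last_pert_ind].split("to ")[-1][:-1]
-- ===== SOURCE B (Python) =====
-- def get_path_to_final_perturbation(lines):
--     succ = [i for i, line in enumerate(lines) if line.startswith("SUCCESS!")]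
--     if len(succ) >= 2:
--         idx = succ[-2]
--     elif succ:
--         idx = succ[-1]
--     else:
--         idx = -1
--     return lines[idx].split("to ")[-1][:-1]
-- ===== Notes on version B (the rewrite author's own statement) =====
-- stated objective: simpler
-- what changed: Replaces the backward early-break scan with mutable counter state by a single forward index comprehension of all SUCCESS! lines followed by a direct select (second-to-last / last / -1).
import Mathlib
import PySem

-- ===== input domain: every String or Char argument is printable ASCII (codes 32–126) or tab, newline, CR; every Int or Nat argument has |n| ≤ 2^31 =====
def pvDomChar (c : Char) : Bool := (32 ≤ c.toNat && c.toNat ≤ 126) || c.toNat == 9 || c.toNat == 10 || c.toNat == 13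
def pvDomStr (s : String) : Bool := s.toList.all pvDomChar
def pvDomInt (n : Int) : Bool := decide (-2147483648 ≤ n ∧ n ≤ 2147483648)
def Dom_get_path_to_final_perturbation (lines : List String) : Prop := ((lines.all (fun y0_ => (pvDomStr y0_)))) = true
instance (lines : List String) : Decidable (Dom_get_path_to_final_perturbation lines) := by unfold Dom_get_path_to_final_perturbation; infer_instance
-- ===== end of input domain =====

-- B replaces A's backward early-break scan (mutable counter state) by a forward index
-- comprehension of all SUCCESS! lines followed by a direct select (simpler decomposition).

-- ===== PORT A =====
-- the for-loop over range(len(lines)-1, -1, -1) with break; state (last_pert_ind, pic_ind);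
-- lines[i] is in range for every i the range produces, so pyGetD is exact here
def pvALoop (lines : List String) : List Int → Int → Int → Int
  | [], last_pert_ind, _ => last_pert_ind
  | i :: rest, last_pert_ind, pic_ind =>
    let line_start := PySem.Str.slice (PySem.List.pyGetD lines i "") (some 0) (some 8)
    if line_start = "SUCCESS!" then
      (if pic_ind + 1 = 2 then i else pvALoop lines rest i (pic_ind + 1))
    else pvALoop lines rest last_pert_ind pic_ind

-- lines[last_pert_ind] is exact under Pre_ (lines ≠ [], index is -1 or a valid position);
-- split("to ") is never empty, so [-1] via pyGetD is exact
def get_path_to_final_perturbation (lines : List String) : String :=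
  let last_pert_ind :=
    pvALoop lines (PySem.List.pyRange ((lines.length : Int) - 1) (-1) (-1)) (-1) 0
  PySem.Str.slice
    (PySem.List.pyGetD
      ((PySem.Str.split? (PySem.List.pyGetD lines last_pert_ind "") "to ").getD []) (-1) "")
    none (some (-1))

-- ===== PORT B =====
-- succ = [i for i, line in enumerate(lines) if line.startswith("SUCCESS!")], then select;
-- same exactness notes for the final expression as in port A
def get_path_to_final_perturbation_alt (lines : List String) : String :=
  let succ := ((PySem.List.enumerate lines 0).filter
      (fun p => PySem.Str.startswith p.2 "SUCCESS!")).map Prod.fst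
  let idx : Int :=
    if 2 ≤ succ.length then PySem.List.pyGetD succ (-2) (-1)
    else if succ ≠ [] then PySem.List.pyGetD succ (-1) (-1)
    else -1
  PySem.Str.slice
    (PySem.List.pyGetD
      ((PySem.Str.split? (PySem.List.pyGetD lines idx "") "to ").getD []) (-1) "")
    none (some (-1))

-- ===== PRECONDITION & SPEC =====
-- Pre_ excludes only the empty list, on which A (and B) raise IndexError (lines[-1])
def Pre_get_path_to_final_perturbation (lines : List String) : Prop := lines ≠ []
instance (lines : List String) : Decidable (Pre_get_path_to_final_perturbation lines) := by
  unfold Pre_get_path_to_final_perturbation; infer_instance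

def pvWitness_get_path_to_final_perturbation : List String :=
  ["starting", "SUCCESS! perturbation saved to out.png!"]

def Spec_get_path_to_final_perturbation (lines : List String) (out : String) : Prop :=
  out = get_path_to_final_perturbation_alt lines
instance (lines : List String) (out : String) :
    Decidable (Spec_get_path_to_final_perturbation lines out) := by
  unfold Spec_get_path_to_final_perturbation; infer_instance

-- ===== CLAIM (what is proved, stated in full; the proofs are below) =====
def Claim_equal_get_path_to_final_perturbation : Prop :=
  ∀ (lines : List String), Dom_get_path_to_final_perturbation lines →
    Pre_get_path_to_final_perturbation lines →
    Spec_get_path_to_final_perturbation lines (get_path_to_final_perturbation lines)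

-- ===== LEMMAS AND PROOFS =====

-- the success test, in B's form
def pvIsSucc (lines : List String) (i : Int) : Bool :=
  PySem.Str.startswith (PySem.List.pyGetD lines i "") "SUCCESS!"

-- A's test (a length-8 slice compared with "SUCCESS!") is the startswith test
theorem pvCond_iff (s : String) :
    PySem.Str.slice s (some 0) (some 8) = "SUCCESS!" ↔
      PySem.Str.startswith s "SUCCESS!" = true := by
  rw [← String.toList_inj]
  simp [PySem.Str.slice, PySem.List.slice_to, PySem.Str.startswith_eq,
    PySem.Chars.startswith_iff, List.prefix_iff_eq_take]
  exact eq_comm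

-- what A's loop computes: the second success index of the traversal order, else the first, else -1
def pvSel : List Int → Int
  | [] => -1
  | [a] => a
  | _ :: b :: _ => b

theorem pvALoop_one (lines : List String) (L : List Int) (last : Int) :
    pvALoop lines L last 1 =
      (match L.filter (pvIsSucc lines) with | [] => last | b :: _ => b) := by
  induction L generalizing last with
  | nil => rfl
  | cons i rest ih =>
    by_cases h : pvIsSucc lines i = true
    · simp only [pvALoop]
      rw [if_pos ((pvCond_iff _).mpr h), if_pos (by norm_num)]
      simp [h]
    · simp only [pvALoop]
      rw [if_neg (fun hc => h ((pvCond_iff _).mp hc)), ih]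
      simp [h]

theorem pvALoop_zero (lines : List String) (L : List Int) :
    pvALoop lines L (-1) 0 = pvSel (L.filter (pvIsSucc lines)) := by
  induction L with
  | nil => rfl
  | cons i rest ih =>
    by_cases h : pvIsSucc lines i = true
    · simp only [pvALoop]
      rw [if_pos ((pvCond_iff _).mpr h), if_neg (by norm_num),
        show (0 : Int) + 1 = 1 from by norm_num, pvALoop_one]
      simp only [List.filter_cons, h, if_pos]
      cases hrf : rest.filter (pvIsSucc lines) with
      | nil => simp [pvSel]
      | cons b t => simp [pvSel]
    · simp only [pvALoop]
      rw [if_neg (fun hc => h ((pvCond_iff _).mp hc)), ih]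
      simp [h]

-- range(n-1, -1, -1) is range(0, n) reversed
theorem pvRange_rev (n : Nat) :
    PySem.List.pyRange ((n : Int) - 1) (-1) (-1) =
      (PySem.List.pyRange 0 (n : Int) 1).reverse := by
  induction n with
  | zero =>
    rw [PySem.List.pyRange_neg_one_eq_nil (by norm_num),
      PySem.List.pyRange_one_eq_nil (by norm_num)]
    rfl
  | succ n ih =>
    have h1 : ((n + 1 : Nat) : Int) - 1 = (n : Int) := by push_cast; ring
    have h2 : ((n + 1 : Nat) : Int) = (n : Int) + 1 := by push_cast; ring
    rw [h1, h2, PySem.List.pyRange_neg_one_cons (by omega),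
      PySem.List.pyRange_one_succ_right (by omega), List.reverse_append]
    simp [ih]

-- B's succ list is the ascending success-index list
theorem pvSucc_eq (lines : List String) :
    ((PySem.List.enumerate lines 0).filter
        (fun p => PySem.Str.startswith p.2 "SUCCESS!")).map Prod.fst =
      (PySem.List.pyRange 0 (lines.length : Int) 1).filter (pvIsSucc lines) := by
  rw [PySem.List.enumerate_eq_map_pyRange (d := "")]
  rw [List.filter_map, List.map_map]
  simp [Function.comp_def]
  exact List.filter_congr (fun x _ => by simp [pvIsSucc])

-- pvSel of a list of length at least 2 is its second element
theorem pvSel_get (L : List Int) (h : 2 ≤ L.length) : pvSel L = L[1]'(by omega) := by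
  match L with
  | [] => simp at h
  | [a] => simp at h
  | a :: b :: t => rfl

-- B's three-way select equals pvSel of the reversed list
theorem pvSel_rev (S : List Int) :
    (if 2 ≤ S.length then PySem.List.pyGetD S (-2) (-1)
     else if S ≠ [] then PySem.List.pyGetD S (-1) (-1)
     else -1) = pvSel S.reverse := by
  match S with
  | [] => rfl
  | [a] => simp [pvSel, PySem.List.pyGetD_neg_one ([a]) (-1) (by simp)]
  | a :: b :: t =>
    have hlen : 2 ≤ (a :: b :: t).length := by simp
    rw [if_pos hlen]
    rw [PySem.List.pyGetD_neg_ofNat (a :: b :: t) 2 (-1) (by omega) hlen]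
    rw [pvSel_get _ (by simp), List.getElem_reverse]
    have h2 : (a :: b :: t).length - 1 - 1 = (a :: b :: t).length - 2 := by omega
    simp only [h2]

-- the two index computations agree
theorem pvIdx_eq (lines : List String) :
    pvALoop lines (PySem.List.pyRange ((lines.length : Int) - 1) (-1) (-1)) (-1) 0 =
      (if 2 ≤ (((PySem.List.enumerate lines 0).filter
            (fun p => PySem.Str.startswith p.2 "SUCCESS!")).map Prod.fst).length then
        PySem.List.pyGetD (((PySem.List.enumerate lines 0).filter
            (fun p => PySem.Str.startswith p.2 "SUCCESS!")).map Prod.fst) (-2) (-1)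
      else if (((PySem.List.enumerate lines 0).filter
            (fun p => PySem.Str.startswith p.2 "SUCCESS!")).map Prod.fst) ≠ [] then
        PySem.List.pyGetD (((PySem.List.enumerate lines 0).filter
            (fun p => PySem.Str.startswith p.2 "SUCCESS!")).map Prod.fst) (-1) (-1)
      else -1) := by
  rw [pvSucc_eq, pvSel_rev, pvRange_rev, pvALoop_zero, List.filter_reverse]

-- ===== VERDICT (by name: the statement is the Claim_ definition above) =====
theorem get_path_to_final_perturbation_spec : Claim_equal_get_path_to_final_perturbation := by
  intro lines _ _
  unfold Spec_get_path_to_final_perturbation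
  unfold get_path_to_final_perturbation get_path_to_final_perturbation_alt
  rw [pvIdx_eq]
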